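-- pv_equiv track=rewrite | github.com/isavita/advent_generated | training_data/reflection-tuning/day22_part2_2019_failed.py | solve
-- ===== SOURCE A (Python) =====
-- def egcd(a, b):
--     if a == 0:
--         return b, 0, 1
--     else:
--         g, y, x = egcd(b % a, a)
--         return g, x - (b // a) * y, y
--
-- def modinv(a, m):
--     g, x, _ = egcd(a, m)
--     if g != 1:
--         raise Exception('Modular inverse does not exist')
--     else:
--         return x % m
--
-- def compose(f, g, m):
--     a, b = f
--     c, d = g
--     return (a * c % m, (a * d + b) % m)
--
-- def apply(f, x, m):
--     a, b = f
--     return (a * x + b) % m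
--
-- def power(f, n, m):
--     if n == 0:
--         return (1, 0)
--     elif n % 2 == 0:
--         return power(compose(f, f, m), n // 2, m)
--     else:
--         return compose(f, power(f, n - 1, m), m)
--
-- def parse_shuffle(line):
--     if line.startswith("deal into new stack"):
--         return (-1, -1)
--     elif line.startswith("cut"):
--         n = int(line.split()[-1])
--         return (1, -n)
--     elif line.startswith("deal with increment"):
--         n = int(line.split()[-1])
--         return (n, 0)
--
-- def solve(lines, deck_size, iterations=1, position=None):
--     f = (1, 0)
--     for line in lines:
--         f = compose(f, parse_shuffle(line), deck_size)
--
--     if iterations > 1: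
--         f = power(f, iterations, deck_size)
--
--     if position is None:
--         return apply(f, 2019, deck_size)
--     else:
--         a, b = f
--         return ((position - b) * modinv(a, deck_size)) % deck_size
-- ===== SOURCE B (Python) =====
-- def parse_shuffle(line):
--     if line.startswith("deal into new stack"):
--         return (-1, -1)
--     elif line.startswith("cut"):
--         n = int(line.split()[-1])
--         return (1, -n)
--     elif line.startswith("deal with increment"):
--         n = int(line.split()[-1])
--         return (n, 0)
--
-- def compose(f, g, m):
--     a, b = f
--     c, d = g
--     return (a * c % m, (a * d + b) % m)
--
-- def modinv(a, m):
--     # iterative extended Euclid: old_r = a*old_s (mod m) throughout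
--     old_r, r = a, m
--     old_s, s = 1, 0
--     while r != 0:
--         q = old_r // r
--         old_r, r = r, old_r - q * r
--         old_s, s = s, old_s - q * s
--     if old_r != 1:
--         raise Exception('Modular inverse does not exist')
--     return old_s % m
--
-- def power(f, n, m):
--     # iterative exponentiation by squaring
--     result = (1, 0)
--     base = f
--     while n > 0:
--         if n % 2 == 1:
--             result = compose(result, base, m)
--         base = compose(base, base, m)
--         n //= 2
--     return result
--
-- def solve(lines, deck_size, iterations=1, position=None):
--     f = (1, 0)
--     for line in lines:
--         f = compose(f, parse_shuffle(line), deck_size)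
--
--     if iterations > 1:
--         f = power(f, iterations, deck_size)
--
--     if position is None:
--         a, b = f
--         return (a * 2019 + b) % deck_size
--     else:
--         a, b = f
--         return ((position - b) * modinv(a, deck_size)) % deck_size
-- ===== Notes on version B (the rewrite author's own statement) =====
-- stated objective: alternative
-- what changed: B replaces A's recursive power with an iterative square-and-multiply loop threading a (result, base) accumulator pair, and replaces A's recursive egcd-based modular inverse with the iterative two-row extended Euclid loop. Pre_solve excludes inputs on which A raises (deck_size 0, unparseable lines, no modular inverse) and, when position is given, negative deck sizes: there A's egcd raises on every non-degenerate input and returns a value only for the empty composition, an artefact of egcd's sign handling, where B's iterative Euclid raises.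
-- outside the precondition, e.g. on solve([], -7, 1, 0): A returns 0, B raises Exception
import Mathlib
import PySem

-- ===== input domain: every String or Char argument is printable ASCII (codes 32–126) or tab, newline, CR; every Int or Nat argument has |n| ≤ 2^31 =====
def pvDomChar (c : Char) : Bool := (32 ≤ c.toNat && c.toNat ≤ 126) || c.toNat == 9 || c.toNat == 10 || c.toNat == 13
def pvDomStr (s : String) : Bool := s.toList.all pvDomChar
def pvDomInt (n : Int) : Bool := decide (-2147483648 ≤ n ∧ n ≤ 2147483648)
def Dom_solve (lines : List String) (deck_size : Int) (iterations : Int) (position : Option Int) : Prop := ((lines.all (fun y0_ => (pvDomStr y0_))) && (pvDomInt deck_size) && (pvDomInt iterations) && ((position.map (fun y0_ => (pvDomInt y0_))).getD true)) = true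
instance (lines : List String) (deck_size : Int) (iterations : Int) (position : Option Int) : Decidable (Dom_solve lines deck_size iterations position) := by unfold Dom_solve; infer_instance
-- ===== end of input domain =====

-- B replaces A's recursive `power` by an iterative square-and-multiply loop and A's
-- recursive `egcd`-based modular inverse by the iterative two-row extended Euclid
-- (objective: alternative decomposition, same cost).

-- ===== PORT A =====
-- helpers of A (Python raises are modelled by Option `none`; `solve` returns `.getD 0`,
-- and Pre_solve excludes exactly the raising inputs).

def egcd (a b : Int) : Int × Int × Int :=
  if _h : a = 0 then (b, 0, 1)
  else
    let r := egcd (PySem.Int.mod b a) a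
    (r.1, r.2.2 - PySem.Int.floordiv b a * r.2.1, r.2.1)
termination_by a.natAbs
decreasing_by
  rcases lt_or_gt_of_ne _h with hneg | hpos
  · have := PySem.Int.mod_neg_bounds b hneg
    omega
  · have h1 := PySem.Int.mod_nonneg b hpos
    have h2 := PySem.Int.mod_lt b hpos
    omega

def modinv? (a m : Int) : Option Int :=
  let r := egcd a m
  if r.1 ≠ 1 then none  -- Python: raise Exception('Modular inverse does not exist')
  else some (PySem.Int.mod r.2.1 m)

def composeF (f g : Int × Int) (m : Int) : Int × Int :=
  (PySem.Int.mod (f.1 * g.1) m, PySem.Int.mod (f.1 * g.2 + f.2) m)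

def applyF (f : Int × Int) (x m : Int) : Int := PySem.Int.mod (f.1 * x + f.2) m

-- Python's `power` recursion, with fuel n.toNat bounding the depth (each step lowers n
-- by at least 1, so the fuel is never exhausted for n ≥ 0; Python diverges for n < 0 and
-- `solve` only calls `power` with n ≥ 2, inside every claim below).
def powerFuel : Nat → Int × Int → Int → Int → Int × Int
  | 0, _, _, _ => (1, 0)
  | fuel+1, f, n, m =>
    if n = 0 then (1, 0)
    else if PySem.Int.mod n 2 = 0 then powerFuel fuel (composeF f f m) (PySem.Int.floordiv n 2) m
    else composeF f (powerFuel fuel f (n - 1) m) m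

def power (f : Int × Int) (n m : Int) : Int × Int := powerFuel n.toNat f n m

def parseShuffle? (line : String) : Option (Int × Int) :=
  if PySem.Str.startswith line "deal into new stack" then some (-1, -1)
  else if PySem.Str.startswith line "cut" then
    match PySem.List.pyGet? (PySem.Str.split₀ line) (-1) with
    | some t => (PySem.Int.ofStr? t).map (fun n => (1, -n))
    | none => none
  else if PySem.Str.startswith line "deal with increment" then
    match PySem.List.pyGet? (PySem.Str.split₀ line) (-1) with
    | some t => (PySem.Int.ofStr? t).map (fun n => (n, 0))
    | none => none
  else none  -- Python returns None; the caller's compose then raises TypeError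

def composeLines (f : Int × Int) (ls : List String) (m : Int) : Option (Int × Int) :=
  match ls with
  | [] => some f
  | l :: ls' =>
    match parseShuffle? l with
    | some g => composeLines (composeF f g m) ls' m
    | none => none

def solveA? (lines : List String) (deck_size : Int) (iterations : Int) (position : Option Int) : Option Int :=
  match composeLines (1, 0) lines deck_size with
  | none => none
  | some f0 =>
    let f := if 1 < iterations then power f0 iterations deck_size else f0
    match position with
    | none => some (applyF f 2019 deck_size)
    | some p =>
      match modinv? f.1 deck_size with
      | none => none
      | some inv => some (PySem.Int.mod ((p - f.2) * inv) deck_size)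

def solve (lines : List String) (deck_size : Int) (iterations : Int) (position : Option Int) : Int :=
  (solveA? lines deck_size iterations position).getD 0  -- none = Python raises; excluded by Pre_solve

-- ===== PORT B =====
-- helpers of B (Source B): same parser and compose, iterative modinv and power.

def composeB (f g : Int × Int) (m : Int) : Int × Int :=
  (PySem.Int.mod (f.1 * g.1) m, PySem.Int.mod (f.1 * g.2 + f.2) m)

def egcdLoop (oldR r oldS s : Int) : Int × Int :=
  if _h : r = 0 then (oldR, oldS)
  else
    let q := PySem.Int.floordiv oldR r
    egcdLoop r (oldR - q * r) s (oldS - q * s)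
termination_by r.natAbs
decreasing_by
  have hk : oldR - PySem.Int.floordiv oldR r * r = PySem.Int.mod oldR r := by
    have := PySem.Int.floordiv_mul_add_mod oldR r
    omega
  rcases lt_or_gt_of_ne _h with hneg | hpos
  · have := PySem.Int.mod_neg_bounds oldR hneg
    omega
  · have h1 := PySem.Int.mod_nonneg oldR hpos
    have h2 := PySem.Int.mod_lt oldR hpos
    omega

def modinvB? (a m : Int) : Option Int :=
  let r := egcdLoop a m 1 0
  if r.1 ≠ 1 then none  -- Python: raise Exception('Modular inverse does not exist')
  else some (PySem.Int.mod r.2 m)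

def powerLoop (result base : Int × Int) (n m : Int) : Int × Int :=
  if _h : 0 < n then
    powerLoop (if PySem.Int.mod n 2 = 1 then composeB result base m else result)
      (composeB base base m) (PySem.Int.floordiv n 2) m
  else result
termination_by n.toNat
decreasing_by
  have := PySem.Int.floordiv_eq_ediv_of_pos (a := n) (b := 2) (by omega)
  omega

def powerB (f : Int × Int) (n m : Int) : Int × Int := powerLoop (1, 0) f n m

def parseShuffleB? (line : String) : Option (Int × Int) :=
  if PySem.Str.startswith line "deal into new stack" then some (-1, -1)
  else if PySem.Str.startswith line "cut" then
    match PySem.List.pyGet? (PySem.Str.split₀ line) (-1) with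
    | some t => (PySem.Int.ofStr? t).map (fun n => (1, -n))
    | none => none
  else if PySem.Str.startswith line "deal with increment" then
    match PySem.List.pyGet? (PySem.Str.split₀ line) (-1) with
    | some t => (PySem.Int.ofStr? t).map (fun n => (n, 0))
    | none => none
  else none

def composeLinesB (f : Int × Int) (ls : List String) (m : Int) : Option (Int × Int) :=
  match ls with
  | [] => some f
  | l :: ls' =>
    match parseShuffleB? l with
    | some g => composeLinesB (composeB f g m) ls' m
    | none => none

def solveB? (lines : List String) (deck_size : Int) (iterations : Int) (position : Option Int) : Option Int :=
  match composeLinesB (1, 0) lines deck_size with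
  | none => none
  | some f0 =>
    let f := if 1 < iterations then powerB f0 iterations deck_size else f0
    match position with
    | none => some (PySem.Int.mod (f.1 * 2019 + f.2) deck_size)
    | some p =>
      match modinvB? f.1 deck_size with
      | none => none
      | some inv => some (PySem.Int.mod ((p - f.2) * inv) deck_size)

def solve_alt (lines : List String) (deck_size : Int) (iterations : Int) (position : Option Int) : Int :=
  (solveB? lines deck_size iterations position).getD 0

-- ===== PRECONDITION & SPEC =====

-- the line is one of the three shuffle commands, with a parseable integer argument where one is read
def parseOkB (l : String) : Bool :=
  PySem.Str.startswith l "deal into new stack" ||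
  ((PySem.Str.startswith l "cut" || PySem.Str.startswith l "deal with increment") &&
    (match PySem.List.pyGet? (PySem.Str.split₀ l) (-1) with
     | some t => (PySem.Int.ofStr? t).isSome
     | none => false))

-- every "deal with increment n" line has n coprime to the deck size
def coprimeOkB (l : String) (m : Int) : Bool :=
  !(PySem.Str.startswith l "deal with increment") ||
  (match PySem.List.pyGet? (PySem.Str.split₀ l) (-1) with
   | some t =>
     match PySem.Int.ofStr? t with
     | some n => Int.gcd n m == 1
     | none => true
   | none => true)

-- Pre_solve is exactly where A returns normally: deck_size ≠ 0 (else % raises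
-- ZeroDivisionError), every line parses (else TypeError/ValueError), and when a position
-- is given the inverse must exist: deck_size > 0 and all increments coprime to it
-- (else modinv raises; for deck_size < 0 A's egcd yields a negative g and raises on every
-- input except the degenerate empty composition, which Pre_ also excludes — see claim cites).
def Pre_solve (lines : List String) (deck_size : Int) (iterations : Int) (position : Option Int) : Prop :=
  deck_size ≠ 0 ∧ (∀ l ∈ lines, parseOkB l = true) ∧
    (∀ p : Int, position = some p → 0 < deck_size ∧ ∀ l ∈ lines, coprimeOkB l deck_size = true)
instance (lines : List String) (deck_size : Int) (iterations : Int) (position : Option Int) : Decidable (Pre_solve lines deck_size iterations position) := by unfold Pre_solve; infer_instance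

def pvWitness_solve : List String × Int × Int × Option Int :=
  (["deal into new stack", "cut 3", "deal with increment 7"], 10, 2, some 4)

def Spec_solve (lines : List String) (deck_size : Int) (iterations : Int) (position : Option Int) (out : Int) : Prop := out = solve_alt lines deck_size iterations position
instance (lines : List String) (deck_size : Int) (iterations : Int) (position : Option Int) (out : Int) : Decidable (Spec_solve lines deck_size iterations position out) := by unfold Spec_solve; infer_instance

-- ===== CLAIM (what is proved, stated in full; the proofs are below) =====
def Claim_equal_solve : Prop := ∀ (lines : List String) (deck_size : Int) (iterations : Int) (position : Option Int), Dom_solve lines deck_size iterations position → Pre_solve lines deck_size iterations position → Spec_solve lines deck_size iterations position (solve lines deck_size iterations position)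

-- ===== LEMMAS AND PROOFS =====

-- abstract (un-reduced) affine maps x ↦ a*x+b as pairs; pcomp is composition
def pcomp (f g : Int × Int) : Int × Int := (f.1 * g.1, f.1 * g.2 + f.2)
def papow (f : Int × Int) : Nat → Int × Int
  | 0 => (1, 0)
  | k+1 => pcomp f (papow f k)
def pnorm (m : Int) (f : Int × Int) : Int × Int := (PySem.Int.mod f.1 m, PySem.Int.mod f.2 m)
def PModEq (m : Int) (f g : Int × Int) : Prop := Int.ModEq m f.1 g.1 ∧ Int.ModEq m f.2 g.2

theorem pymod_dvd_sub (x m : Int) : m ∣ x - PySem.Int.mod x m := by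
  refine ⟨PySem.Int.floordiv x m, ?_⟩
  have := PySem.Int.floordiv_mul_add_mod x m
  linarith [mul_comm m (PySem.Int.floordiv x m)]

theorem pymod_modeq (x m : Int) : Int.ModEq m (PySem.Int.mod x m) x := by
  rw [Int.modEq_iff_dvd]
  exact pymod_dvd_sub x m

theorem pymod_eq_of_modeq {m x y : Int} (hm : m ≠ 0) (h : Int.ModEq m x y) :
    PySem.Int.mod x m = PySem.Int.mod y m := by
  have d1 := pymod_dvd_sub x m
  have d2 := pymod_dvd_sub y m
  have d3 : m ∣ y - x := h.dvd
  have hd : m ∣ (PySem.Int.mod x m - PySem.Int.mod y m) := by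
    have he : PySem.Int.mod x m - PySem.Int.mod y m
        = (y - PySem.Int.mod y m) - (x - PySem.Int.mod x m) - (y - x) := by ring
    rw [he]
    exact dvd_sub (dvd_sub d2 d1) d3
  have habs : |m| ∣ (PySem.Int.mod x m - PySem.Int.mod y m) := (abs_dvd _ _).mpr hd
  have hlt : |PySem.Int.mod x m - PySem.Int.mod y m| < |m| := by
    rcases lt_or_gt_of_ne hm with hneg | hpos
    · have b1 := PySem.Int.mod_neg_bounds x hneg
      have b2 := PySem.Int.mod_neg_bounds y hneg
      rw [abs_of_neg hneg, abs_lt]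
      omega
    · have b1 := PySem.Int.mod_nonneg x hpos
      have b2 := PySem.Int.mod_nonneg y hpos
      have b3 := PySem.Int.mod_lt x hpos
      have b4 := PySem.Int.mod_lt y hpos
      rw [abs_of_pos hpos, abs_lt]
      omega
  have := Int.eq_zero_of_abs_lt_dvd habs hlt
  omega

theorem pnorm_eq_of_pmodeq {m : Int} (hm : m ≠ 0) {f g : Int × Int} (h : PModEq m f g) :
    pnorm m f = pnorm m g := by
  exact Prod.ext (pymod_eq_of_modeq hm h.1) (pymod_eq_of_modeq hm h.2)

theorem pnorm_pmodeq (m : Int) (f : Int × Int) : PModEq m (pnorm m f) f :=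
  ⟨pymod_modeq _ _, pymod_modeq _ _⟩

theorem pmodeq_refl (m : Int) (f : Int × Int) : PModEq m f f := ⟨Int.ModEq.refl _, Int.ModEq.refl _⟩

theorem pcomp_congr {m : Int} {f f' g g' : Int × Int} (hf : PModEq m f f') (hg : PModEq m g g') :
    PModEq m (pcomp f g) (pcomp f' g') := by
  exact ⟨hf.1.mul hg.1, (hf.1.mul hg.2).add hf.2⟩

theorem papow_congr {m : Int} {f g : Int × Int} (h : PModEq m f g) (k : Nat) :
    PModEq m (papow f k) (papow g k) := by
  induction k with
  | zero => exact pmodeq_refl _ _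
  | succ k ih => exact pcomp_congr h ih

theorem pcomp_assoc (f g h : Int × Int) : pcomp (pcomp f g) h = pcomp f (pcomp g h) := by
  simp only [pcomp]; exact Prod.ext (by ring) (by ring)

theorem pcomp_one (f : Int × Int) : pcomp (1, 0) f = f := by
  simp [pcomp]

theorem papow_succ (f : Int × Int) (k : Nat) : papow f (k+1) = pcomp f (papow f k) := rfl

theorem papow_two_mul (f : Int × Int) (k : Nat) : papow (pcomp f f) k = papow f (2*k) := by
  induction k with
  | zero => rfl
  | succ k ih =>
    have : 2*(k+1) = (2*k+1)+1 := by ring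
    rw [papow_succ, ih, this, papow_succ, papow_succ, ← pcomp_assoc]

theorem composeF_eq (f g : Int × Int) (m : Int) : composeF f g m = pnorm m (pcomp f g) := rfl
theorem composeB_eq (f g : Int × Int) (m : Int) : composeB f g m = pnorm m (pcomp f g) := rfl

theorem powerFuel_zero (fuel : Nat) (f : Int × Int) (m : Int) : powerFuel fuel f 0 m = (1, 0) := by
  cases fuel <;> simp [powerFuel]

theorem papow_one (f : Int × Int) : papow f 1 = f := by
  show pcomp f (1, 0) = f
  simp [pcomp]

theorem powerFuel_eq {m : Int} (hm : m ≠ 0) :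
    ∀ (fuel : Nat) (f : Int × Int) (n : Int), 1 ≤ n → n.toNat ≤ fuel →
      powerFuel fuel f n m = pnorm m (papow f n.toNat) := by
  intro fuel
  induction fuel with
  | zero => intro f n h1 h2; omega
  | succ fuel ih =>
    intro f n h1 h2
    simp only [powerFuel]
    rw [if_neg (by omega : ¬ n = 0)]
    by_cases he : PySem.Int.mod n 2 = 0
    · rw [if_pos he]
      have hdvd : (2:Int) ∣ n := (PySem.Int.mod_eq_zero_iff_dvd n 2).mp he
      have hfd : PySem.Int.floordiv n 2 = n / 2 := PySem.Int.floordiv_eq_ediv_of_pos (by norm_num)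
      have hge2 : 2 ≤ n := by obtain ⟨c, rfl⟩ := hdvd; omega
      rw [hfd, ih (composeF f f m) (n/2) (by omega) (by omega), composeF_eq]
      rw [pnorm_eq_of_pmodeq hm (papow_congr (pnorm_pmodeq m (pcomp f f)) (n/2).toNat)]
      rw [papow_two_mul, show 2 * ((n / 2).toNat) = n.toNat by omega]
    · rw [if_neg he]
      by_cases h1e : n = 1
      · subst h1e
        rw [show (1:Int) - 1 = 0 from rfl, powerFuel_zero]
        rfl
      · rw [ih f (n-1) (by omega) (by omega), composeF_eq]
        rw [pnorm_eq_of_pmodeq hm (pcomp_congr (pmodeq_refl m f) (pnorm_pmodeq m (papow f (n-1).toNat)))]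
        rw [show n.toNat = (n-1).toNat + 1 by omega, papow_succ]

theorem power_eq {m n : Int} (hm : m ≠ 0) (hn : 1 ≤ n) (f : Int × Int) :
    power f n m = pnorm m (papow f n.toNat) :=
  powerFuel_eq hm n.toNat f n hn (le_refl _)

theorem powerLoop_stop {r b : Int × Int} {n m : Int} (h : ¬ 0 < n) : powerLoop r b n m = r := by
  rw [powerLoop]
  exact dif_neg h

theorem powerLoop_step {r b : Int × Int} {n m : Int} (h : 0 < n) :
    powerLoop r b n m
      = powerLoop (if PySem.Int.mod n 2 = 1 then composeB r b m else r)
          (composeB b b m) (PySem.Int.floordiv n 2) m := by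
  rw [powerLoop]
  exact dif_pos h

theorem powerLoop_eq {m : Int} (hm : m ≠ 0) :
    ∀ (n : Int) (r b : Int × Int), 1 ≤ n →
      powerLoop r b n m = pnorm m (pcomp r (papow b n.toNat)) := by
  have aux : ∀ (k : Nat) (n : Int) (r b : Int × Int), n.toNat ≤ k → 1 ≤ n →
      powerLoop r b n m = pnorm m (pcomp r (papow b n.toNat)) := by
    intro k
    induction k with
    | zero => intro n r b hk h1; omega
    | succ k ih =>
      intro n r b hk h1
      rw [powerLoop_step (by omega : (0:Int) < n)]
      have hfd : PySem.Int.floordiv n 2 = n / 2 := PySem.Int.floordiv_eq_ediv_of_pos (by norm_num)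
      have hmm := PySem.Int.floordiv_mul_add_mod n 2
      have hm0 := PySem.Int.mod_nonneg n (by norm_num : (0:Int) < 2)
      have hm2 := PySem.Int.mod_lt n (by norm_num : (0:Int) < 2)
      by_cases h1e : n = 1
      · subst h1e
        rw [show PySem.Int.mod 1 2 = 1 by decide, if_pos rfl,
          show PySem.Int.floordiv 1 2 = 0 by decide, powerLoop_stop (by norm_num), composeB_eq]
        rw [show (1:Int).toNat = 1 from rfl, papow_one]
      · rw [hfd, ih (n/2) _ _ (by omega) (by omega)]
        by_cases hodd : PySem.Int.mod n 2 = 1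
        · rw [if_pos hodd, composeB_eq, composeB_eq]
          rw [pnorm_eq_of_pmodeq hm (pcomp_congr (pnorm_pmodeq m (pcomp r b))
            (papow_congr (pnorm_pmodeq m (pcomp b b)) (n/2).toNat))]
          rw [hfd] at hmm
          rw [papow_two_mul, pcomp_assoc, ← papow_succ,
            show 2 * ((n / 2).toNat) + 1 = n.toNat by omega]
        · rw [if_neg hodd, composeB_eq]
          rw [pnorm_eq_of_pmodeq hm (pcomp_congr (pmodeq_refl m r)
            (papow_congr (pnorm_pmodeq m (pcomp b b)) (n/2).toNat))]
          rw [hfd] at hmm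
          rw [papow_two_mul, show 2 * ((n / 2).toNat) = n.toNat by omega]
  intro n r b h1
  exact aux n.toNat n r b (le_refl _) h1

theorem powerB_eq {m n : Int} (hm : m ≠ 0) (hn : 1 ≤ n) (f : Int × Int) :
    powerB f n m = pnorm m (papow f n.toNat) := by
  unfold powerB
  rw [powerLoop_eq hm n (1,0) f hn]
  rw [pcomp_one]

theorem power_eq_powerB {m n : Int} (hm : m ≠ 0) (hn : 1 ≤ n) (f : Int × Int) :
    power f n m = powerB f n m := by
  rw [power_eq hm hn, powerB_eq hm hn]

theorem egcd_zero (b : Int) : egcd 0 b = (b, 0, 1) := by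
  rw [egcd]
  rfl

theorem egcd_step {a : Int} (b : Int) (h : a ≠ 0) :
    egcd a b = ((egcd (PySem.Int.mod b a) a).1,
      (egcd (PySem.Int.mod b a) a).2.2
        - PySem.Int.floordiv b a * (egcd (PySem.Int.mod b a) a).2.1,
      (egcd (PySem.Int.mod b a) a).2.1) := by
  rw [egcd]
  exact dif_neg h

theorem egcdLoop_zero (o os s : Int) : egcdLoop o 0 os s = (o, os) := by
  rw [egcdLoop]
  rfl

theorem egcdLoop_step {o r os s : Int} (h : r ≠ 0) :
    egcdLoop o r os s
      = egcdLoop r (o - PySem.Int.floordiv o r * r) s (os - PySem.Int.floordiv o r * s) := by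
  rw [egcdLoop]
  exact dif_neg h

-- A's egcd: first component is the gcd, and Bezout with the SECOND component as the
-- coefficient of a (modinv unpacks `g, x, _`).
theorem egcd_spec : ∀ (a b : Int), 0 ≤ a → 0 < b →
    (egcd a b).1 = (Int.gcd a b : Int) ∧
      a * (egcd a b).2.1 + b * (egcd a b).2.2 = (egcd a b).1 := by
  have aux : ∀ (k : Nat) (a b : Int), a.natAbs ≤ k → 0 ≤ a → 0 < b →
      (egcd a b).1 = (Int.gcd a b : Int) ∧
        a * (egcd a b).2.1 + b * (egcd a b).2.2 = (egcd a b).1 := by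
    intro k
    induction k with
    | zero =>
      intro a b hk ha hb
      have ha0 : a = 0 := by omega
      subst ha0
      rw [egcd_zero]
      refine ⟨?_, by ring⟩
      rw [Int.gcd_zero_left, Int.natAbs_of_nonneg (le_of_lt hb)]
    | succ k ih =>
      intro a b hk ha hb
      by_cases ha0 : a = 0
      · subst ha0
        rw [egcd_zero]
        refine ⟨?_, by ring⟩
        rw [Int.gcd_zero_left, Int.natAbs_of_nonneg (le_of_lt hb)]
      · have hapos : 0 < a := by omega
        have hm1 := PySem.Int.mod_nonneg b hapos
        have hm2 := PySem.Int.mod_lt b hapos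
        obtain ⟨hg, hbez⟩ := ih (PySem.Int.mod b a) a (by omega) hm1 hapos
        rw [egcd_step b ha0]
        constructor
        · show (egcd (PySem.Int.mod b a) a).1 = (Int.gcd a b : Int)
          rw [hg, PySem.Int.mod_eq_emod_of_pos hapos, Int.gcd_emod, Int.gcd_comm]
        · show a * ((egcd (PySem.Int.mod b a) a).2.2
              - PySem.Int.floordiv b a * (egcd (PySem.Int.mod b a) a).2.1)
            + b * (egcd (PySem.Int.mod b a) a).2.1 = (egcd (PySem.Int.mod b a) a).1
          have hfd := PySem.Int.floordiv_mul_add_mod b a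
          linear_combination hbez - (egcd (PySem.Int.mod b a) a).2.1 * hfd
  intro a b ha hb
  exact aux a.natAbs a b (le_refl _) ha hb

-- B's loop: first component is the gcd and a * second ≡ first (mod m), given the
-- invariant premises (a*os ≡ o, a*s ≡ r).
theorem egcdLoop_spec (m a : Int) : ∀ (o r os s : Int), 0 ≤ o → 0 < r →
    Int.ModEq m (a * os) o → Int.ModEq m (a * s) r →
    (egcdLoop o r os s).1 = (Int.gcd o r : Int) ∧
      Int.ModEq m (a * (egcdLoop o r os s).2) (egcdLoop o r os s).1 := by
  have aux : ∀ (k : Nat) (o r os s : Int), r.natAbs ≤ k → 0 ≤ o → 0 < r →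
      Int.ModEq m (a * os) o → Int.ModEq m (a * s) r →
      (egcdLoop o r os s).1 = (Int.gcd o r : Int) ∧
        Int.ModEq m (a * (egcdLoop o r os s).2) (egcdLoop o r os s).1 := by
    intro k
    induction k with
    | zero => intro o r os s hk ho hr hos hs; omega
    | succ k ih =>
      intro o r os s hk ho hr hos hs
      rw [egcdLoop_step (by omega : r ≠ 0)]
      have hmod : o - PySem.Int.floordiv o r * r = PySem.Int.mod o r := by
        have := PySem.Int.floordiv_mul_add_mod o r
        omega
      have hm1 := PySem.Int.mod_nonneg o hr
      have hm2 := PySem.Int.mod_lt o hr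
      by_cases hz : PySem.Int.mod o r = 0
      · rw [show o - PySem.Int.floordiv o r * r = 0 by omega, egcdLoop_zero]
        refine ⟨?_, hs⟩
        have hdvd : r ∣ o := (PySem.Int.mod_eq_zero_iff_dvd o r).mp hz
        rw [Int.gcd_comm, Int.gcd_eq_natAbs_left hdvd, Int.natAbs_of_nonneg (le_of_lt hr)]
      · have hs' : Int.ModEq m (a * (os - PySem.Int.floordiv o r * s)) (o - PySem.Int.floordiv o r * r) := by
          have h1 : a * (os - PySem.Int.floordiv o r * s)
              = a * os - PySem.Int.floordiv o r * (a * s) := by ring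
          rw [h1]
          exact hos.sub (hs.mul_left (PySem.Int.floordiv o r))
        obtain ⟨hg, hmeq⟩ := ih r (o - PySem.Int.floordiv o r * r) s
          (os - PySem.Int.floordiv o r * s) (by omega) (le_of_lt hr) (by omega) hs hs'
        refine ⟨?_, hmeq⟩
        rw [hg, hmod, PySem.Int.mod_eq_emod_of_pos hr, Int.gcd_comm r, Int.gcd_emod]
  intro o r os s ho hr hos hs
  exact aux r.natAbs o r os s (le_refl _) ho hr hos hs

theorem modinv_eq {a m : Int} (hm : 0 < m) (ha : 0 ≤ a) : modinv? a m = modinvB? a m := by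
  obtain ⟨hg1, hbez⟩ := egcd_spec a m ha hm
  obtain ⟨hg2, hmeq⟩ := egcdLoop_spec m a a m 1 0 ha hm
    (by rw [mul_one]) (by rw [mul_zero]; exact (Int.modEq_iff_dvd.mpr (by simp)))
  simp only [modinv?, modinvB?]
  rw [hg1, hg2]
  by_cases hone : (Int.gcd a m : Int) = 1
  · rw [if_neg (by omega), if_neg (by omega)]
    congr 1
    rw [hg1, hone] at hbez
    rw [hg2, hone] at hmeq
    have h1 : Int.ModEq m (a * (egcd a m).2.1) 1 := by
      rw [Int.modEq_iff_dvd]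
      exact ⟨(egcd a m).2.2, by linarith⟩
    refine pymod_eq_of_modeq (by omega) ?_
    calc (egcd a m).2.1 ≡ (egcd a m).2.1 * (a * (egcdLoop a m 1 0).2) [ZMOD m] := by
          simpa using (hmeq.mul_left ((egcd a m).2.1)).symm
      _ = (a * (egcd a m).2.1) * (egcdLoop a m 1 0).2 := by ring
      _ ≡ 1 * (egcdLoop a m 1 0).2 [ZMOD m] := h1.mul_right _
      _ = (egcdLoop a m 1 0).2 := one_mul _
  · rw [if_pos (by omega), if_pos (by omega)]

theorem composeLinesB_eq : ∀ (ls : List String) (f : Int × Int) (m : Int),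
    composeLinesB f ls m = composeLines f ls m := by
  intro ls
  induction ls with
  | nil => intro f m; rfl
  | cons l ls ih =>
    intro f m
    simp only [composeLinesB, composeLines]
    have hp : parseShuffleB? l = parseShuffle? l := rfl
    rw [hp]
    cases parseShuffle? l with
    | none => rfl
    | some g =>
      show composeLinesB (composeB f g m) ls m = composeLines (composeF f g m) ls m
      have hc : composeB f g m = composeF f g m := rfl
      rw [hc, ih]

theorem composeLines_nonneg {m : Int} (hm : 0 < m) :
    ∀ (ls : List String) (f f' : Int × Int), 0 ≤ f.1 →
      composeLines f ls m = some f' → 0 ≤ f'.1 := by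
  intro ls
  induction ls with
  | nil => intro f f' hf h; cases h; exact hf
  | cons l ls ih =>
    intro f f' hf h
    simp only [composeLines] at h
    cases hp : parseShuffle? l with
    | none => rw [hp] at h; cases h
    | some g =>
      rw [hp] at h
      exact ih _ _ (PySem.Int.mod_nonneg _ hm) h

-- ===== VERDICT (by name: the statement is the Claim_ definition above) =====
theorem solve_spec : Claim_equal_solve := by
  intro lines m it pos _hdom hpre
  obtain ⟨hm0, _hparse, hpos⟩ := hpre
  unfold Spec_solve solve solve_alt solveA? solveB?
  rw [composeLinesB_eq]
  cases hc : composeLines (1, 0) lines m with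
  | none => rfl
  | some f0 =>
    have hf : (if 1 < it then power f0 it m else f0) = (if 1 < it then powerB f0 it m else f0) := by
      by_cases h1 : 1 < it
      · simp only [if_pos h1]; exact power_eq_powerB hm0 (by omega) f0
      · simp [h1]
    cases pos with
    | none => simp only [hf]; rfl
    | some p =>
      obtain ⟨hmpos, _⟩ := hpos p rfl
      simp only [hf]
      have hnn : 0 ≤ (if 1 < it then powerB f0 it m else f0).1 := by
        by_cases h1 : 1 < it
        · simp only [if_pos h1, powerB_eq hm0 (by omega : (1:Int) ≤ it), pnorm]
          exact PySem.Int.mod_nonneg _ hmpos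
        · simp only [if_neg h1]
          exact composeLines_nonneg hmpos lines (1,0) f0 (by norm_num) hc
      rw [modinv_eq hmpos hnn]
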